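-- pv_equiv track=rewrite | github.com/psupranovich/gcs-cli-tests | src/helpers/data_helper.py | extract_bucket_ids
-- ===== SOURCE A (Python) =====
-- def extract_bucket_ids(output_data) -> list:
--     """
--     Extracts bucket IDs from gcloud storage buckets list YAML output.
--     """
--     bucket_ids = []
--     lines = output_data.split("---")
--     for line in lines:
--         for sub_line in line.split("\n"):
--             if sub_line.strip().startswith("name:"):
--                 bucket_id = sub_line.split(":", 1)[1].strip()
--                 bucket_ids.append(bucket_id)
--     return bucket_ids
-- ===== SOURCE B (Python) =====
-- def _flush(cur, bucket_ids):
--     line = "".join(cur)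
--     if line.strip().startswith("name:"):
--         bucket_ids.append(line.split(":", 1)[1].strip())
--
--
-- def extract_bucket_ids(output_data) -> list:
--     """
--     Extracts bucket IDs from gcloud storage buckets list YAML output.
--
--     Single left-to-right character scan: lines are delimited by either a
--     newline or a '---' document separator; each completed line is checked
--     and harvested on the fly, so the text is never split into lists.
--     """
--     bucket_ids = []
--     cur = []
--     i, n = 0, len(output_data)
--     while i < n:
--         if output_data.startswith("---", i):
--             _flush(cur, bucket_ids)
--             cur = []
--             i += 3
--         elif output_data[i] == "\n":
--             _flush(cur, bucket_ids)
--             cur = []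
--             i += 1
--         else:
--             cur.append(output_data[i])
--             i += 1
--     _flush(cur, bucket_ids)
--     return bucket_ids
-- ===== Notes on version B (the rewrite author's own statement) =====
-- stated objective: alternative
-- what changed: Replaces A's staged nested splits (split on '---', then each piece on '\n', then test each piece) with a single left-to-right character scan that recognises the two line delimiters itself and checks/harvests each completed line on the fly, never materialising the split lists.
import Mathlib
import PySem

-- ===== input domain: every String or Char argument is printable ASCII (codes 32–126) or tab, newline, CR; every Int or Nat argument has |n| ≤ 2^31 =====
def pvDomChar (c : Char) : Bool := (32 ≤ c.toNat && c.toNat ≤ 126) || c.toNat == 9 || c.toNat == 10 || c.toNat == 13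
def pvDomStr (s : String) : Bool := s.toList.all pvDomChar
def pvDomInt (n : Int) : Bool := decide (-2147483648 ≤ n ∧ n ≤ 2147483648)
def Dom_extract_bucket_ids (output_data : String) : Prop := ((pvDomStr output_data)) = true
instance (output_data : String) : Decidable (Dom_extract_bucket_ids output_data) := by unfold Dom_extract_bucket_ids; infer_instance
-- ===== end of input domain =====

-- B replaces A's staged nested splits (on "---", then on "\n") with a single left-to-right
-- character scan that recognises both line delimiters itself and harvests each completed
-- line on the fly; objective: alternative (same cost, different algorithm).

-- shared by both ports: line.split(":", 1)[1].strip() — the [1] index always exists here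
-- because the guard ensures the line contains "name:", hence a ':'; pyGet? is therefore some.
def pvExtractName (sub_line : List Char) : String :=
  String.ofList (PySem.Chars.strip
    ((PySem.List.pyGet? (PySem.Chars.splitOnMax sub_line [':'] 1) 1).getD []))

-- ===== PORT A =====
def extract_bucket_ids (output_data : String) : List String :=
  (PySem.Chars.splitOn output_data.toList ['-', '-', '-']).foldl
    (fun bucket_ids line =>
      (PySem.Chars.splitOn line ['\n']).foldl
        (fun bs sub_line =>
          if PySem.Chars.startswith (PySem.Chars.strip sub_line) "name:".toList then
            bs ++ [pvExtractName sub_line]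
          else bs)
        bucket_ids)
    []

-- ===== PORT B =====
-- _flush(cur, bucket_ids): test the completed line, harvest the id if it matches
def pvFlush (cur : List Char) (bucket_ids : List String) : List String :=
  if PySem.Chars.startswith (PySem.Chars.strip cur) "name:".toList then
    bucket_ids ++ [pvExtractName cur]
  else bucket_ids

-- the while loop of B: one pass over the characters, `cur` = current line, `bucket_ids` = acc
def pvScan : List Char → List Char → List String → List String
  | [], cur, bucket_ids => pvFlush cur bucket_ids
  | c :: t, cur, bucket_ids =>
    if (['-', '-', '-'] : List Char).isPrefixOf (c :: t) then
      pvScan ((c :: t).drop 3) [] (pvFlush cur bucket_ids)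
    else if c = '\n' then
      pvScan t [] (pvFlush cur bucket_ids)
    else
      pvScan t (cur ++ [c]) bucket_ids
  termination_by l => l.length
  decreasing_by
    · simp
    · simp
    · simp

def extract_bucket_ids_alt (output_data : String) : List String :=
  pvScan output_data.toList [] []

-- ===== PRECONDITION & SPEC =====
def Spec_extract_bucket_ids (output_data : String) (out : List String) : Prop := out = extract_bucket_ids_alt output_data
instance (output_data : String) (out : List String) : Decidable (Spec_extract_bucket_ids output_data out) := by unfold Spec_extract_bucket_ids; infer_instance

-- ===== CLAIM (what is proved, stated in full; the proofs are below) =====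
def Claim_equal_extract_bucket_ids : Prop := ∀ (output_data : String), Dom_extract_bucket_ids output_data → Spec_extract_bucket_ids output_data (extract_bucket_ids output_data)

-- ===== LEMMAS AND PROOFS =====

-- fuel-free characterisation of PySem.Chars.splitOn for a nonempty separator
def sp (sep : List Char) (hsep : sep ≠ []) : List Char → List (List Char)
  | [] => [[]]
  | c :: t =>
    if sep.isPrefixOf (c :: t) then [] :: sp sep hsep ((c :: t).drop sep.length)
    else (sp sep hsep t).modifyHead (c :: ·)
  termination_by l => l.length
  decreasing_by
    · have : 0 < sep.length := List.length_pos_of_ne_nil hsep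
      simp; omega
    · simp

-- the normalization "---" ↦ '\n' (proof device only; B does not compute it)
def rp (old new : List Char) (hold : old ≠ []) : List Char → List Char
  | [] => []
  | c :: t =>
    if old.isPrefixOf (c :: t) then new ++ rp old new hold ((c :: t).drop old.length)
    else c :: rp old new hold t
  termination_by l => l.length
  decreasing_by
    · have : 0 < old.length := List.length_pos_of_ne_nil hold
      simp; omega
    · simp

theorem sp_ne_nil (sep : List Char) (hsep : sep ≠ []) (l : List Char) :
    sp sep hsep l ≠ [] := by
  induction l using sp.induct sep hsep with
  | case1 => simp [sp]
  | case2 c t hp _ => rw [sp]; simp [hp]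
  | case3 c t hp ih =>
    rw [sp]
    simp only [hp]
    cases hsp : sp sep hsep t with
    | nil => exact absurd hsp ih
    | cons a b => simp

theorem go_spec (sep : List Char) (hsep : sep ≠ []) :
    ∀ fuel l cur acc, l.length ≤ fuel →
      PySem.Chars.splitOn.go sep fuel l cur acc
        = acc.reverse ++ (sp sep hsep l).modifyHead (cur.reverse ++ ·) := by
  intro fuel
  induction fuel with
  | zero =>
    intro l cur acc h
    match l with
    | [] => rw [PySem.Chars.splitOn.go]; simp [sp, List.modifyHead]
    | c :: t => simp at h
  | succ n ih =>
    intro l cur acc h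
    match l with
    | [] =>
      rw [PySem.Chars.splitOn.go]
      · simp [sp]
      · omega
    | c :: t =>
      rw [PySem.Chars.splitOn.go]
      have hlen : t.length + 1 ≤ n + 1 := by simpa using h
      have hsl : 0 < sep.length := List.length_pos_of_ne_nil hsep
      by_cases hp : sep.isPrefixOf (c :: t)
      · simp only [hp, if_true]
        rw [ih ((c :: t).drop sep.length) [] (cur.reverse :: acc)
            (by simp; omega)]
        rw [sp]
        simp only [hp, if_true]
        cases hsp : sp sep hsep ((c :: t).drop sep.length) with
        | nil => exact absurd hsp (sp_ne_nil _ _ _)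
        | cons a b => simp [List.modifyHead]
      · simp only [hp]
        rw [ih t (c :: cur) acc (by omega)]
        rw [sp]
        simp only [hp]
        cases hsp : sp sep hsep t with
        | nil => exact absurd hsp (sp_ne_nil _ _ _)
        | cons a b => simp [List.modifyHead]

theorem splitOn_eq_sp (sep : List Char) (hsep : sep ≠ []) (s : List Char) :
    PySem.Chars.splitOn s sep = sp sep hsep s := by
  have := go_spec sep hsep (s.length + 1) s [] [] (by omega)
  rw [PySem.Chars.splitOn, this]
  cases sp sep hsep s <;> simp [List.modifyHead]

theorem hSEP : (['-', '-', '-'] : List Char) ≠ [] := by decide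
theorem hNL : (['\n'] : List Char) ≠ [] := by decide

theorem sp_nl_cons (c : Char) (t : List Char) :
    sp ['\n'] hNL (c :: t)
      = if c = '\n' then [] :: sp ['\n'] hNL t
        else (sp ['\n'] hNL t).modifyHead (c :: ·) := by
  rw [sp]
  by_cases hc : c = '\n'
  · subst hc; simp [List.isPrefixOf]
  · simp [List.isPrefixOf, hc, Ne.symm hc]

-- flattening the newline-split of the "---"-pieces = newline-split of the normalized string
theorem main_flat (s : List Char) :
    (sp ['-', '-', '-'] hSEP s).flatMap (sp ['\n'] hNL)
      = sp ['\n'] hNL (rp ['-', '-', '-'] ['\n'] hSEP s) := by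
  induction s using sp.induct ['-', '-', '-'] hSEP with
  | case1 => simp [sp, rp]
  | case2 c t hp ih =>
    rw [sp]
    simp only [hp, if_true]
    rw [rp]
    simp only [hp, if_true]
    rw [List.flatMap_cons, ih]
    rw [show (['\n'] ++ rp ['-', '-', '-'] ['\n'] hSEP ((c :: t).drop (['-', '-', '-'] : List Char).length))
          = '\n' :: rp ['-', '-', '-'] ['\n'] hSEP ((c :: t).drop (['-', '-', '-'] : List Char).length) from rfl]
    rw [sp_nl_cons]
    simp [sp]
  | case3 c t hp ih =>
    rw [sp]
    rw [rp]
    simp only [hp, Bool.false_eq_true, if_false]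
    rw [sp_nl_cons]
    cases hsp : sp ['-', '-', '-'] hSEP t with
    | nil => exact absurd hsp (sp_ne_nil _ _ _)
    | cons a b =>
      rw [hsp] at ih
      by_cases hc : c = '\n'
      · subst hc
        simp only [if_true, List.modifyHead, List.flatMap_cons, sp_nl_cons]
        rw [← ih]
        simp
      · simp only [hc, if_false, List.modifyHead, List.flatMap_cons, sp_nl_cons]
        rw [← ih]
        simp only [List.flatMap_cons]
        cases hna : sp ['\n'] hNL a with
        | nil => exact absurd hna (sp_ne_nil _ _ _)
        | cons x y => simp

-- the body of A's inner fold, as a named function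
def pvG (bs : List String) (sub_line : List Char) : List String :=
  if PySem.Chars.startswith (PySem.Chars.strip sub_line) "name:".toList then
    bs ++ [pvExtractName sub_line]
  else bs

theorem pvFlush_eq_pvG (cur : List Char) (ids : List String) :
    pvFlush cur ids = pvG ids cur := rfl

theorem modifyHead_nil_append (l : List (List Char)) :
    l.modifyHead (fun x => [] ++ x) = l := by cases l <;> simp

-- B's scanner folds A's body over the lines of the normalized string
theorem pvScan_spec (l cur : List Char) (ids : List String) :
    pvScan l cur ids
      = ((sp ['\n'] hNL (rp ['-', '-', '-'] ['\n'] hSEP l)).modifyHead (cur ++ ·)).foldl pvG ids := by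
  induction l using sp.induct ['-', '-', '-'] hSEP generalizing cur ids with
  | case1 =>
    rw [pvScan, rp, sp]
    simp [List.modifyHead, pvFlush_eq_pvG]
  | case2 c t hp ih =>
    rw [pvScan]
    simp only [hp, if_true]
    rw [rp]
    simp only [hp, if_true]
    rw [show (['\n'] ++ rp ['-', '-', '-'] ['\n'] hSEP ((c :: t).drop (['-', '-', '-'] : List Char).length))
          = '\n' :: rp ['-', '-', '-'] ['\n'] hSEP ((c :: t).drop (['-', '-', '-'] : List Char).length) from rfl]
    rw [sp_nl_cons]
    simp only [if_true, List.modifyHead]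
    rw [show (3 : Nat) = (['-', '-', '-'] : List Char).length from rfl, ih, modifyHead_nil_append]
    simp [pvFlush_eq_pvG]
  | case3 c t hp ih =>
    rw [pvScan]
    simp only [hp, Bool.false_eq_true, if_false]
    rw [rp]
    simp only [hp, Bool.false_eq_true, if_false]
    rw [sp_nl_cons]
    by_cases hc : c = '\n'
    · subst hc
      simp only [if_true, List.modifyHead]
      rw [ih, modifyHead_nil_append]
      simp [pvFlush_eq_pvG]
    · simp only [hc, if_false]
      rw [ih (cur ++ [c]) ids]
      cases hsp : sp ['\n'] hNL (rp ['-', '-', '-'] ['\n'] hSEP t) with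
      | nil => exact absurd hsp (sp_ne_nil _ _ _)
      | cons a b => simp [List.modifyHead]

-- ===== VERDICT (by name: the statement is the Claim_ definition above) =====
theorem extract_bucket_ids_spec : Claim_equal_extract_bucket_ids := by
  intro s _
  unfold Spec_extract_bucket_ids extract_bucket_ids extract_bucket_ids_alt
  rw [pvScan_spec]
  simp only [splitOn_eq_sp _ hSEP, splitOn_eq_sp _ hNL]
  rw [← List.foldl_flatMap (f := sp ['\n'] hNL)
      (g := fun bs sub_line =>
        if PySem.Chars.startswith (PySem.Chars.strip sub_line) "name:".toList then
          bs ++ [pvExtractName sub_line]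
        else bs)
      (l := sp ['-', '-', '-'] hSEP s.toList) (init := ([] : List String))]
  rw [main_flat]
  cases hsp : sp ['\n'] hNL (rp ['-', '-', '-'] ['\n'] hSEP s.toList) with
  | nil => exact absurd hsp (sp_ne_nil _ _ _)
  | cons a b =>
    have hfun : (fun bs sub_line =>
        if PySem.Chars.startswith (PySem.Chars.strip sub_line) "name:".toList then
          bs ++ [pvExtractName sub_line]
        else bs) = pvG := by
      funext bs l; simp [pvG]
    rw [hfun]
    simp [List.modifyHead]
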